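-- pv_equiv track=rewrite | github.com/jame2546/Comprog | P2/P2_05_Anagram2.py | Process
-- ===== SOURCE A (Python) =====
-- def Format(word):
--     return {c: word.lower().count(c) for c in sorted(word.lower()) if c in "abcdefghijklmnopqrstuvwxyz"}
--
-- def Addzero (word1,word2) :
--     for t in word1 :
--         if t not in word2 :
--             word2[t] = 0
--     for t in word2 :
--         if t not in word1 :
--             word1[t] = 0
--
-- def Process(word1,word2) :
--     word1,word2 = Format(word1),Format(word2)
--     Addzero(word1,word2)
--     del_1 = []
--     del_2 = []
--     for t in word1 :
--         while word1[t] > word2[t] :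
--             word1[t] -= 1
--             del_1.append(t)
--     for t in word2 :
--         while word2[t] > word1[t] :
--             word2[t] -= 1
--             del_2.append(t)
--     return sorted(del_1),sorted(del_2)
-- ===== SOURCE B (Python) =====
-- def Process(word1, word2):
--     w1, w2 = word1.lower(), word2.lower()
--     del_1, del_2 = [], []
--     for c in "abcdefghijklmnopqrstuvwxyz":
--         n1, n2 = w1.count(c), w2.count(c)
--         if n1 > n2:
--             del_1.extend(c * (n1 - n2))
--         elif n2 > n1:
--             del_2.extend(c * (n2 - n1))
--     return del_1, del_2
-- ===== Notes on version B (the rewrite author's own statement) =====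
-- stated objective: faster
-- what changed: Replaces the count-dict construction over sorted(word) (a count() scan per character), key-zero-padding, while-drain loops and two final sorts with a single pass over the 26-letter alphabet that appends each letter's count difference directly, producing already-sorted output with no dicts and no sort calls.
import Mathlib
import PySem

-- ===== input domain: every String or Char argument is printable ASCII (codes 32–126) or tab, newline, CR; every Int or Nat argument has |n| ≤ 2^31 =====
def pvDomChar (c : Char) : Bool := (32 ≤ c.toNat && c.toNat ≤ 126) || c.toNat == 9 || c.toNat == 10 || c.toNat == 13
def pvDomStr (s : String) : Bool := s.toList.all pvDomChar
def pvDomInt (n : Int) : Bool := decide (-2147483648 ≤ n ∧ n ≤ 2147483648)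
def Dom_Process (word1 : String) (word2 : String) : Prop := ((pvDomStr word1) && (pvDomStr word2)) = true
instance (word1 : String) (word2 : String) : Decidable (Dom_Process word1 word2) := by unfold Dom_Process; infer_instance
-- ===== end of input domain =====

-- B replaces A's count-dicts, zero-padding and while-drain loops (plus final sorts) by one pass
-- over the 26-letter alphabet that emits each letter's count difference directly (objective: faster; measured).


def pvAlpha : List Char := "abcdefghijklmnopqrstuvwxyz".toList

-- ===== PORT A =====
-- `c in "abc…"` and `word.lower().count(c)` for a single char c are char membership / char count: exact.
def pvFormat (word : String) : PySem.Dict Char Int :=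
  let l := PySem.Chars.lower word.toList
  (PySem.List.sorted l (fun c => c) false).foldl
    (fun d c => if pvAlpha.contains c then d.insert c (l.count c : Int) else d)
    PySem.Dict.empty

def pvAddzero (w1 w2 : PySem.Dict Char Int) : PySem.Dict Char Int × PySem.Dict Char Int :=
  let w2' := w1.keys.foldl (fun d t => if d.contains t then d else d.insert t 0) w2
  let w1' := w2'.keys.foldl (fun d t => if d.contains t then d else d.insert t 0) w1
  (w1', w2')

-- the `while wordX[t] > wordY[t]` drain; t is a key of both dicts after Addzero, so getD _ _ 0 is exact
def pvDrain (d1 : PySem.Dict Char Int) (d2 : PySem.Dict Char Int) (t : Char)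
    (acc : List String) : PySem.Dict Char Int × List String :=
  if _h : d2.getD t 0 < d1.getD t 0 then
    pvDrain (d1.insert t (d1.getD t 0 - 1)) d2 t (acc ++ [String.ofList [t]])
  else (d1, acc)
termination_by (d1.getD t 0 - d2.getD t 0).toNat
decreasing_by
  simp only [PySem.Dict.getD_eq_get?_getD, PySem.Dict.get?_insert_self, Option.getD_some] at _h ⊢
  omega

-- `for t in wordX: while …` over the dict's keys
def pvLoop (ts : List Char) (dOther : PySem.Dict Char Int) (d : PySem.Dict Char Int) :
    PySem.Dict Char Int × List String :=
  ts.foldl (fun st t => pvDrain st.1 dOther t st.2) (d, [])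

def Process (word1 : String) (word2 : String) : List String × List String :=
  let p := pvAddzero (pvFormat word1) (pvFormat word2)
  let r1 := pvLoop p.1.keys p.2 p.1
  let r2 := pvLoop p.2.keys r1.1 p.2
  (PySem.List.sorted r1.2 (fun s => s) false, PySem.List.sorted r2.2 (fun s => s) false)

-- ===== PORT B =====
-- `w.count(c)` for a single char c is char count: exact.
def Process_alt (word1 : String) (word2 : String) : List String × List String :=
  let w1 := PySem.Chars.lower word1.toList
  let w2 := PySem.Chars.lower word2.toList
  pvAlpha.foldl
    (fun (p : List String × List String) c =>
      let n1 := w1.count c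
      let n2 := w2.count c
      if n2 < n1 then (p.1 ++ List.replicate (n1 - n2) (String.ofList [c]), p.2)
      else if n1 < n2 then (p.1, p.2 ++ List.replicate (n2 - n1) (String.ofList [c]))
      else p)
    ([], [])

-- ===== PRECONDITION & SPEC =====
def Spec_Process (word1 : String) (word2 : String) (out : List String × List String) : Prop := out = Process_alt word1 word2
instance (word1 : String) (word2 : String) (out : List String × List String) : Decidable (Spec_Process word1 word2 out) := by unfold Spec_Process; infer_instance

-- ===== CLAIM (what is proved, stated in full; the proofs are below) =====
def Claim_equal_Process : Prop := ∀ (word1 : String) (word2 : String), Dom_Process word1 word2 → Spec_Process word1 word2 (Process word1 word2)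

-- ===== LEMMAS AND PROOFS =====

-- the single-char string embedding and per-letter replication used to compare the two sides
def pvEmb (c : Char) : String := String.ofList [c]
def pvRep (f : Char → Nat) (xs : List Char) : List Char := xs.flatMap (fun c => List.replicate (f c) c)

theorem pvEmb_mono (a b : Char) (h : a ≤ b) : pvEmb a ≤ pvEmb b := by
  by_cases hab : a = b
  · subst hab; exact le_refl _
  · have hlt : a < b := lt_of_le_of_ne h hab
    refine le_of_lt ?_
    rw [String.lt_iff_toList_lt]
    simpa [pvEmb] using List.Lex.rel hlt

theorem pvCount_rep (f : Char → Nat) (xs : List Char) (hx : xs.Nodup) (a : Char) :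
    (pvRep f xs).count a = if a ∈ xs then f a else 0 := by
  induction xs with
  | nil => simp [pvRep]
  | cons c cs ih =>
    simp only [List.nodup_cons] at hx
    simp only [pvRep, List.flatMap_cons, List.count_append, List.count_replicate]
    rw [show List.flatMap (fun c => List.replicate (f c) c) cs = pvRep f cs from rfl, ih hx.2]
    by_cases hac : a = c
    · subst hac; simp [hx.1]
    · simp [hac, Ne.symm hac]

theorem pvRep_perm (f : Char → Nat) (xs ys : List Char) (hx : xs.Nodup) (hy : ys.Nodup)
    (h : ∀ c, f c ≠ 0 → (c ∈ xs ↔ c ∈ ys)) : (pvRep f xs).Perm (pvRep f ys) := by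
  rw [List.perm_iff_count]
  intro a
  rw [pvCount_rep f xs hx a, pvCount_rep f ys hy a]
  by_cases hf : f a = 0
  · simp [hf]
  · simp only [h a hf]

theorem pvRep_mem {f : Char → Nat} {xs : List Char} {x : Char} (h : x ∈ pvRep f xs) : x ∈ xs := by
  simp only [pvRep, List.mem_flatMap, List.mem_replicate] at h
  obtain ⟨c, hc, _, rfl⟩ := h
  exact hc

theorem pvRep_pairwise (f : Char → Nat) (xs : List Char) (h : xs.Pairwise (· < ·)) :
    (pvRep f xs).Pairwise (· ≤ ·) := by
  induction xs with
  | nil => simp [pvRep]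
  | cons c cs ih =>
    simp only [List.pairwise_cons] at h
    simp only [pvRep, List.flatMap_cons]
    rw [List.pairwise_append]
    refine ⟨List.pairwise_replicate.2 (by simp), ih h.2, ?_⟩
    intro a ha b hb
    have hac : a = c := (List.mem_replicate.1 ha).2
    have hbc : b ∈ cs := pvRep_mem hb
    subst hac
    exact le_of_lt (h.1 b hbc)

theorem pvFlatMap_rep_emb (f : Char → Nat) (xs : List Char) :
    xs.flatMap (fun c => List.replicate (f c) (pvEmb c)) = (pvRep f xs).map pvEmb := by
  rw [pvRep, List.map_flatMap]
  simp [List.map_replicate]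

-- Format-style build: conditional insert of a value depending only on the key
theorem pvBuild_get? (p : Char → Bool) (v : Char → Int) (xs : List Char) (d : PySem.Dict Char Int) (a : Char) :
    (xs.foldl (fun d c => if p c then d.insert c (v c) else d) d).get? a
      = if a ∈ xs ∧ p a then some (v a) else d.get? a := by
  induction xs generalizing d with
  | nil => simp
  | cons c cs ih =>
    simp only [List.foldl_cons]
    rw [ih]
    by_cases hm : a ∈ cs ∧ p a
    · simp [hm]
    · simp only [hm, if_false]
      by_cases hac : a = c
      · subst hac
        by_cases hp : p a
        · simp [hp, PySem.Dict.get?_insert_self]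
        · simp [hp]
      · by_cases hp : p c
        · have hcc : ¬(a ∈ c :: cs ∧ p a = true) := by simp_all
          simp [hp, PySem.Dict.get?_insert_of_ne _ _ hac]
          tauto
        · simp [hp, hac, hm]

theorem pvBuild_keys_mem (p : Char → Bool) (v : Char → Int) (xs : List Char) (d : PySem.Dict Char Int) (a : Char) :
    a ∈ (xs.foldl (fun d c => if p c then d.insert c (v c) else d) d).keys
      ↔ (a ∈ xs ∧ p a) ∨ a ∈ d.keys := by
  induction xs generalizing d with
  | nil => simp
  | cons c cs ih =>
    simp only [List.foldl_cons]
    rw [ih]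
    by_cases hp : p c
    · simp only [hp, if_true, PySem.Dict.mem_keys_insert]
      constructor
      · rintro (h | (rfl | h)) <;> simp_all
      · rintro (⟨h, hpa⟩ | h)
        · rcases List.mem_cons.1 h with rfl | h
          · exact Or.inr (Or.inl rfl)
          · exact Or.inl ⟨h, hpa⟩
        · exact Or.inr (Or.inr h)
    · simp only [hp]
      constructor
      · rintro (⟨h, hpa⟩ | h)
        · exact Or.inl ⟨List.mem_cons_of_mem _ h, hpa⟩
        · exact Or.inr h
      · rintro (⟨h, hpa⟩ | h)
        · rcases List.mem_cons.1 h with rfl | h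
          · exact absurd hpa (by simp [hp])
          · exact Or.inl ⟨h, hpa⟩
        · exact Or.inr h

theorem pvBuild_keys_nodup (p : Char → Bool) (v : Char → Int) (xs : List Char) (d : PySem.Dict Char Int)
    (hd : d.keys.Nodup) : (xs.foldl (fun d c => if p c then d.insert c (v c) else d) d).keys.Nodup := by
  induction xs generalizing d with
  | nil => simpa
  | cons c cs ih =>
    simp only [List.foldl_cons]
    by_cases hp : p c
    · simp only [hp, if_true]
      exact ih _ (PySem.Dict.nodup_keys_insert _ _ _ hd)
    · simp only [hp]; exact ih _ hd

-- Addzero-style pad: insert 0 at keys not yet present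
theorem pvPad_get? (xs : List Char) (d : PySem.Dict Char Int) (a : Char) :
    (xs.foldl (fun d t => if d.contains t then d else d.insert t 0) d).get? a
      = if d.contains a then d.get? a else if a ∈ xs then some 0 else none := by
  induction xs generalizing d with
  | nil =>
    simp only [List.foldl_nil, List.not_mem_nil, if_false]
    by_cases hda : d.contains a
    · simp [hda]
    · simp [hda, (PySem.Dict.get?_eq_none_iff_contains _ _).2 (by simpa using hda)]
  | cons c cs ih =>
    simp only [List.foldl_cons]
    rw [ih]
    by_cases hdc : d.contains c
    · rw [if_pos hdc]
      by_cases hda : d.contains a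
      · simp [hda]
      · by_cases hac : a = c
        · subst hac; exact absurd hdc hda
        · simp [hda, hac]
    · rw [if_neg hdc]
      by_cases hac : a = c
      · subst hac
        simp [PySem.Dict.contains_insert_self, PySem.Dict.get?_insert_self, hdc]
      · have h1 : (d.insert c 0).contains a = d.contains a := by
          rw [PySem.Dict.contains_insert]
          simp [hac]
        rw [h1, PySem.Dict.get?_insert_of_ne _ _ hac]
        simp [hac]

theorem pvPad_keys_mem (xs : List Char) (d : PySem.Dict Char Int) (a : Char) :
    a ∈ (xs.foldl (fun d t => if d.contains t then d else d.insert t 0) d).keys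
      ↔ a ∈ d.keys ∨ a ∈ xs := by
  induction xs generalizing d with
  | nil => simp
  | cons c cs ih =>
    simp only [List.foldl_cons]
    rw [ih]
    by_cases hdc : d.contains c
    · rw [if_pos hdc]
      simp only [List.mem_cons]
      constructor
      · rintro (h | h) <;> tauto
      · rintro (h | rfl | h)
        · tauto
        · exact Or.inl ((PySem.Dict.contains_iff_mem_keys _ _).1 hdc)
        · tauto
    · rw [if_neg hdc]
      simp only [PySem.Dict.mem_keys_insert, List.mem_cons]
      tauto

theorem pvPad_keys_nodup (xs : List Char) (d : PySem.Dict Char Int) (hd : d.keys.Nodup) :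
    (xs.foldl (fun d t => if d.contains t then d else d.insert t 0) d).keys.Nodup := by
  induction xs generalizing d with
  | nil => simpa
  | cons c cs ih =>
    simp only [List.foldl_cons]
    by_cases hdc : d.contains c
    · rw [if_pos hdc]; exact ih _ hd
    · rw [if_neg hdc]; exact ih _ (PySem.Dict.nodup_keys_insert _ _ _ hd)

-- drain characterisation
theorem pvDrain_snd (d1 d2 : PySem.Dict Char Int) (t : Char) (acc : List String) :
    (pvDrain d1 d2 t acc).2 = acc ++ List.replicate (d1.getD t 0 - d2.getD t 0).toNat (pvEmb t) := by
  fun_induction pvDrain d1 d2 t acc with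
  | case1 d1 acc h ih =>
    rw [ih]
    have h1 : (d1.insert t (d1.getD t 0 - 1)).getD t 0 = d1.getD t 0 - 1 := by
      simp [PySem.Dict.getD_eq_get?_getD, PySem.Dict.get?_insert_self]
    rw [h1]
    have h2 : (d1.getD t 0 - d2.getD t 0).toNat = (d1.getD t 0 - 1 - d2.getD t 0).toNat + 1 := by omega
    rw [h2, List.replicate_succ]
    simp [pvEmb]
  | case2 d1 acc h =>
    have h2 : (d1.getD t 0 - d2.getD t 0).toNat = 0 := by omega
    simp [h2]

theorem pvDrain_fst_getD (d1 d2 : PySem.Dict Char Int) (t : Char) (acc : List String) (x : Char) :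
    (pvDrain d1 d2 t acc).1.getD x 0
      = if x = t then min (d1.getD t 0) (d2.getD t 0) else d1.getD x 0 := by
  fun_induction pvDrain d1 d2 t acc with
  | case1 d1 acc h ih =>
    rw [ih]
    have h1 : (d1.insert t (d1.getD t 0 - 1)).getD t 0 = d1.getD t 0 - 1 := by
      simp [PySem.Dict.getD_eq_get?_getD, PySem.Dict.get?_insert_self]
    by_cases hxt : x = t
    · subst hxt; rw [if_pos rfl, if_pos rfl, h1]; omega
    · rw [if_neg hxt, if_neg hxt]
      simp [PySem.Dict.getD_eq_get?_getD, PySem.Dict.get?_insert_of_ne _ _ hxt]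
  | case2 d1 acc h =>
    by_cases hxt : x = t
    · subst hxt; rw [if_pos rfl]
      rw [show ((d1, acc) : PySem.Dict Char Int × List String).1 = d1 from rfl]
      omega
    · rw [if_neg hxt]

theorem pvLoop_spec (ts : List Char) (dOther : PySem.Dict Char Int) (d : PySem.Dict Char Int)
    (hnd : ts.Nodup) :
    (pvLoop ts dOther d).2
      = ts.flatMap (fun t => List.replicate ((d.getD t 0 - dOther.getD t 0).toNat) (pvEmb t))
    ∧ ∀ x, (pvLoop ts dOther d).1.getD x 0
      = if x ∈ ts then min (d.getD x 0) (dOther.getD x 0) else d.getD x 0 := by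
  suffices h : ∀ (acc : List String) (d : PySem.Dict Char Int),
      (ts.foldl (fun st t => pvDrain st.1 dOther t st.2) (d, acc)).2
        = acc ++ ts.flatMap (fun t => List.replicate ((d.getD t 0 - dOther.getD t 0).toNat) (pvEmb t))
      ∧ ∀ x, (ts.foldl (fun st t => pvDrain st.1 dOther t st.2) (d, acc)).1.getD x 0
        = if x ∈ ts then min (d.getD x 0) (dOther.getD x 0) else d.getD x 0 by
    have := h [] d
    simpa [pvLoop] using this
  clear d
  induction ts with
  | nil => simp
  | cons t ts ih =>
    intro acc d
    simp only [List.nodup_cons] at hnd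
    simp only [List.foldl_cons]
    obtain ⟨ih1, ih2⟩ := ih hnd.2 (pvDrain d dOther t acc).2 (pvDrain d dOther t acc).1
    constructor
    · rw [ih1, pvDrain_snd, List.flatMap_cons, List.append_assoc]
      congr 1
      congr 1
      apply List.flatMap_congr
      intro x hx
      have hxt : x ≠ t := fun hh => hnd.1 (hh ▸ hx)
      rw [pvDrain_fst_getD, if_neg hxt]
    · intro x
      rw [ih2 x]
      by_cases hxts : x ∈ ts
      · have hxt : x ≠ t := fun hh => hnd.1 (hh ▸ hxts)
        rw [if_pos hxts, if_pos (List.mem_cons_of_mem _ hxts), pvDrain_fst_getD, if_neg hxt]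
      · rw [if_neg hxts, pvDrain_fst_getD]
        by_cases hxt : x = t
        · subst hxt; rw [if_pos rfl, if_pos (List.mem_cons_self)]
        · rw [if_neg hxt, if_neg (by simp [hxt, hxts])]

-- B's fold, closed form
theorem pvAlt_foldl (w1 w2 : List Char) (cs : List Char) (a1 a2 : List String) :
    cs.foldl
      (fun (p : List String × List String) c =>
        let n1 := w1.count c
        let n2 := w2.count c
        if n2 < n1 then (p.1 ++ List.replicate (n1 - n2) (String.ofList [c]), p.2)
        else if n1 < n2 then (p.1, p.2 ++ List.replicate (n2 - n1) (String.ofList [c]))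
        else p) (a1, a2)
    = (a1 ++ cs.flatMap (fun c => List.replicate (w1.count c - w2.count c) (pvEmb c)),
       a2 ++ cs.flatMap (fun c => List.replicate (w2.count c - w1.count c) (pvEmb c))) := by
  induction cs generalizing a1 a2 with
  | nil => simp
  | cons c cs ih =>
    simp only [List.foldl_cons, List.flatMap_cons]
    rcases Nat.lt_trichotomy (w2.count c) (w1.count c) with hlt | heq | hgt
    · rw [if_pos hlt, ih]
      have h2 : w2.count c - w1.count c = 0 := by omega
      simp [h2, pvEmb]
    · rw [if_neg (by omega), if_neg (by omega), ih]
      have h1 : w1.count c - w2.count c = 0 := by omega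
      have h2 : w2.count c - w1.count c = 0 := by omega
      simp [h1, h2]
    · rw [if_neg (by omega), if_pos hgt, ih]
      have h1 : w1.count c - w2.count c = 0 := by omega
      simp [h1, pvEmb]

-- characterisation of the dicts after Format + Addzero
theorem pvFormat_get? (w : String) (a : Char) :
    (pvFormat w).get? a
      = if a ∈ PySem.Chars.lower w.toList ∧ a ∈ pvAlpha
        then some (((PySem.Chars.lower w.toList).count a : Int)) else none := by
  unfold pvFormat
  rw [pvBuild_get?]
  simp [PySem.List.mem_sorted]

theorem pvFormat_keys_mem (w : String) (a : Char) :
    a ∈ (pvFormat w).keys ↔ a ∈ PySem.Chars.lower w.toList ∧ a ∈ pvAlpha := by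
  unfold pvFormat
  rw [pvBuild_keys_mem]
  simp [PySem.List.mem_sorted]

theorem pvFormat_keys_nodup (w : String) : (pvFormat w).keys.Nodup := by
  unfold pvFormat
  exact pvBuild_keys_nodup _ _ _ _ (by simp)

theorem pvFormat_contains (w : String) (a : Char) :
    (pvFormat w).contains a = true ↔ a ∈ PySem.Chars.lower w.toList ∧ a ∈ pvAlpha := by
  rw [PySem.Dict.contains_iff_mem_keys, pvFormat_keys_mem]

theorem pvAfter_keys_mem (w1 w2 : String) (a : Char) :
    (a ∈ (pvAddzero (pvFormat w1) (pvFormat w2)).1.keys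
      ↔ a ∈ pvAlpha ∧ (a ∈ PySem.Chars.lower w1.toList ∨ a ∈ PySem.Chars.lower w2.toList))
    ∧ (a ∈ (pvAddzero (pvFormat w1) (pvFormat w2)).2.keys
      ↔ a ∈ pvAlpha ∧ (a ∈ PySem.Chars.lower w1.toList ∨ a ∈ PySem.Chars.lower w2.toList)) := by
  unfold pvAddzero
  constructor
  · rw [pvPad_keys_mem]
    simp only [pvPad_keys_mem, pvFormat_keys_mem]
    tauto
  · rw [pvPad_keys_mem]
    simp only [pvFormat_keys_mem]
    tauto

theorem pvAfter_keys_nodup (w1 w2 : String) :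
    (pvAddzero (pvFormat w1) (pvFormat w2)).1.keys.Nodup
    ∧ (pvAddzero (pvFormat w1) (pvFormat w2)).2.keys.Nodup := by
  unfold pvAddzero
  exact ⟨pvPad_keys_nodup _ _ (pvFormat_keys_nodup w1),
         pvPad_keys_nodup _ _ (pvFormat_keys_nodup w2)⟩

theorem pvAfter_getD (w1 w2 : String) (a : Char) (ha : a ∈ pvAlpha) :
    (pvAddzero (pvFormat w1) (pvFormat w2)).1.getD a 0 = ((PySem.Chars.lower w1.toList).count a : Int)
    ∧ (pvAddzero (pvFormat w1) (pvFormat w2)).2.getD a 0 = ((PySem.Chars.lower w2.toList).count a : Int) := by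
  have key : ∀ (w : String) (xs : List Char),
      (xs.foldl (fun d t => if d.contains t then d else d.insert t 0) (pvFormat w)).getD a 0
        = ((PySem.Chars.lower w.toList).count a : Int) := by
    intro w xs
    rw [PySem.Dict.getD_eq_get?_getD, pvPad_get?]
    by_cases hc : (pvFormat w).contains a
    · rw [if_pos hc, pvFormat_get?]
      have hm := (pvFormat_contains w a).1 hc
      simp [hm.1, hm.2]
    · rw [if_neg hc]
      have hnm : ¬(a ∈ PySem.Chars.lower w.toList ∧ a ∈ pvAlpha) :=
        fun hh => hc ((pvFormat_contains w a).2 hh)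
      have hcount : (PySem.Chars.lower w.toList).count a = 0 :=
        List.count_eq_zero.2 (fun hmem => hnm ⟨hmem, ha⟩)
      rw [hcount]
      by_cases hx : a ∈ xs <;> simp [hx]
  unfold pvAddzero
  exact ⟨key w1 _, key w2 _⟩

theorem pvProcess_eq (word1 word2 : String) : Process word1 word2 = Process_alt word1 word2 := by
  have hAlphaNd : pvAlpha.Nodup := by decide
  have hAlphaLt : pvAlpha.Pairwise (· < ·) := by decide
  -- abbreviations
  set l1 := PySem.Chars.lower word1.toList with hl1
  set l2 := PySem.Chars.lower word2.toList with hl2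
  set P := pvAddzero (pvFormat word1) (pvFormat word2) with hP
  set k1 : Char → Nat := fun c => l1.count c - l2.count c with hk1
  set k2 : Char → Nat := fun c => l2.count c - l1.count c with hk2
  obtain ⟨hnd1, hnd2⟩ := pvAfter_keys_nodup word1 word2
  have hmem1 : ∀ a, a ∈ P.1.keys ↔ a ∈ pvAlpha ∧ (a ∈ l1 ∨ a ∈ l2) :=
    fun a => (pvAfter_keys_mem word1 word2 a).1
  have hmem2 : ∀ a, a ∈ P.2.keys ↔ a ∈ pvAlpha ∧ (a ∈ l1 ∨ a ∈ l2) :=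
    fun a => (pvAfter_keys_mem word1 word2 a).2
  have hgd : ∀ a ∈ pvAlpha, P.1.getD a 0 = (l1.count a : Int) ∧ P.2.getD a 0 = (l2.count a : Int) :=
    fun a ha => pvAfter_getD word1 word2 a ha
  obtain ⟨h1snd, h1fst⟩ := pvLoop_spec P.1.keys P.2 P.1 hnd1
  obtain ⟨h2snd, _⟩ := pvLoop_spec P.2.keys (pvLoop P.1.keys P.2 P.1).1 P.2 hnd2
  -- first list of deletions
  have e1 : (pvLoop P.1.keys P.2 P.1).2 = (pvRep k1 P.1.keys).map pvEmb := by
    rw [h1snd, ← pvFlatMap_rep_emb]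
    apply List.flatMap_congr
    intro t ht
    have hta : t ∈ pvAlpha := ((hmem1 t).1 ht).1
    obtain ⟨hg1, hg2⟩ := hgd t hta
    rw [hg1, hg2]
    congr 1
    simp only [hk1]
    omega
  -- second list of deletions
  have e2 : (pvLoop P.2.keys (pvLoop P.1.keys P.2 P.1).1 P.2).2 = (pvRep k2 P.2.keys).map pvEmb := by
    rw [h2snd, ← pvFlatMap_rep_emb]
    apply List.flatMap_congr
    intro t ht
    have hta : t ∈ pvAlpha := ((hmem2 t).1 ht).1
    have htk1 : t ∈ P.1.keys := (hmem1 t).2 ((hmem2 t).1 ht)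
    obtain ⟨hg1, hg2⟩ := hgd t hta
    rw [h1fst t, if_pos htk1, hg1, hg2]
    congr 1
    simp only [hk2]
    omega
  -- membership agreement between keys and alphabet where the count difference is non-zero
  have hm1 : ∀ c, k1 c ≠ 0 → (c ∈ pvAlpha ↔ c ∈ P.1.keys) := by
    intro c hc
    have hcl1 : c ∈ l1 := by
      simp only [hk1] at hc
      have : 0 < l1.count c := by omega
      exact List.count_pos_iff.1 this
    constructor
    · intro ha; exact (hmem1 c).2 ⟨ha, Or.inl hcl1⟩
    · intro hk; exact ((hmem1 c).1 hk).1
  have hm2 : ∀ c, k2 c ≠ 0 → (c ∈ pvAlpha ↔ c ∈ P.2.keys) := by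
    intro c hc
    have hcl2 : c ∈ l2 := by
      simp only [hk2] at hc
      have : 0 < l2.count c := by omega
      exact List.count_pos_iff.1 this
    constructor
    · intro ha; exact (hmem2 c).2 ⟨ha, Or.inr hcl2⟩
    · intro hk; exact ((hmem2 c).1 hk).1
  -- sortedness of B's per-letter output
  have hsorted : ∀ (f : Char → Nat), ((pvRep f pvAlpha).map pvEmb).Pairwise (· ≤ ·) :=
    fun f => List.pairwise_map.2 ((pvRep_pairwise f pvAlpha hAlphaLt).imp (fun h => pvEmb_mono _ _ h))
  have hperm1 : ((pvRep k1 pvAlpha).map pvEmb).Perm ((pvRep k1 P.1.keys).map pvEmb) :=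
    (pvRep_perm k1 pvAlpha P.1.keys hAlphaNd hnd1 hm1).map pvEmb
  have hperm2 : ((pvRep k2 pvAlpha).map pvEmb).Perm ((pvRep k2 P.2.keys).map pvEmb) :=
    (pvRep_perm k2 pvAlpha P.2.keys hAlphaNd hnd2 hm2).map pvEmb
  -- assemble
  show (PySem.List.sorted (pvLoop P.1.keys P.2 P.1).2 (fun s => s) false,
        PySem.List.sorted (pvLoop P.2.keys (pvLoop P.1.keys P.2 P.1).1 P.2).2 (fun s => s) false)
      = Process_alt word1 word2
  rw [e1, e2]
  have hs1 : PySem.List.sorted ((pvRep k1 P.1.keys).map pvEmb) (fun s => s) false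
      = (pvRep k1 pvAlpha).map pvEmb :=
    PySem.List.sorted_id_eq_of_perm_of_pairwise _ _ hperm1 (hsorted k1)
  have hs2 : PySem.List.sorted ((pvRep k2 P.2.keys).map pvEmb) (fun s => s) false
      = (pvRep k2 pvAlpha).map pvEmb :=
    PySem.List.sorted_id_eq_of_perm_of_pairwise _ _ hperm2 (hsorted k2)
  rw [hs1, hs2]
  show _ = Process_alt word1 word2
  unfold Process_alt
  rw [pvAlt_foldl]
  simp only [List.nil_append]
  rw [pvFlatMap_rep_emb, pvFlatMap_rep_emb]

-- ===== VERDICT (by name: the statement is the Claim_ definition above) =====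
theorem Process_spec : Claim_equal_Process := by
  intro word1 word2 _hdom
  unfold Spec_Process
  exact pvProcess_eq word1 word2
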